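-- pv_equiv track=rewrite | github.com/jadeeu/SamplePRG1 | S10273501D_Assignment.py | initialize_discovered
-- ===== SOURCE A (Python) =====
-- def initialize_discovered(width, height, player_x, player_y):
--     discovered = [[False] * width for _ in range(height)]
--     for dy in range(-1, 2):
--         for dx in range(-1, 2):
--             nx, ny = player_x + dx, player_y + dy
--             if 0 <= nx < width and 0 <= ny < height:
--                 discovered[ny][nx] = True
--     return discovered
-- ===== SOURCE B (Python) =====
-- def initialize_discovered(width, height, player_x, player_y):
--     return [[abs(x - player_x) <= 1 and abs(y - player_y) <= 1
--              for x in range(width)]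
--             for y in range(height)]
-- ===== Notes on version B (the rewrite author's own statement) =====
-- stated objective: simpler
-- what changed: Replaces the all-False grid plus a 3x3 patch loop with bounds checks by a single nested comprehension that decides each cell directly from the Chebyshev distance to the player.
import Mathlib
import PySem

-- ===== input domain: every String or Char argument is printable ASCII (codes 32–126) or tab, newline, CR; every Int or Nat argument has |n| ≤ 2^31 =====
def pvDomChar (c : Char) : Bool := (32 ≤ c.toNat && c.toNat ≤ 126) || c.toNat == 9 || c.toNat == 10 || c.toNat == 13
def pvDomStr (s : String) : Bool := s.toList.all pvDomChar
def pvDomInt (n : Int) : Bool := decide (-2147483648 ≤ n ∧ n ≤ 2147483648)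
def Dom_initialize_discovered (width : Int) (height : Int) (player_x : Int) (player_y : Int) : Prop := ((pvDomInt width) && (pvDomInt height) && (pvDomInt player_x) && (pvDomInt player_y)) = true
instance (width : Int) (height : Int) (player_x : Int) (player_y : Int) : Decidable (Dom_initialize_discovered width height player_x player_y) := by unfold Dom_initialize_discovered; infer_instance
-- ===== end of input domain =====

-- B replaces the all-False grid plus a 3x3 patch loop by one nested comprehension deciding each cell directly (objective: simpler).


-- ===== PORT A =====
-- loop body of A: 'if 0 <= nx < width and 0 <= ny < height: discovered[ny][nx] = True'
def pvUpd (width height : Int) (g : List (List Bool)) (ny nx : Int) : List (List Bool) :=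
  if 0 ≤ nx ∧ nx < width ∧ 0 ≤ ny ∧ ny < height then
    g.set ny.toNat ((g[ny.toNat]?.getD []).set nx.toNat true)
  else g

def initialize_discovered (width : Int) (height : Int) (player_x : Int) (player_y : Int) : List (List Bool) :=
  let discovered := (List.range height.toNat).map (fun _ => List.replicate width.toNat false)
  (PySem.List.pyRange (-1) 2 1).foldl (fun g dy =>
    (PySem.List.pyRange (-1) 2 1).foldl (fun g dx =>
      pvUpd width height g (player_y + dy) (player_x + dx)) g) discovered

-- ===== PORT B =====
def initialize_discovered_alt (width : Int) (height : Int) (player_x : Int) (player_y : Int) : List (List Bool) :=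
  (PySem.List.pyRange 0 height 1).map (fun y =>
    (PySem.List.pyRange 0 width 1).map (fun x =>
      decide ((x - player_x).natAbs ≤ 1) && decide ((y - player_y).natAbs ≤ 1)))

-- ===== PRECONDITION & SPEC =====
def Spec_initialize_discovered (width : Int) (height : Int) (player_x : Int) (player_y : Int) (out : List (List Bool)) : Prop := out = initialize_discovered_alt width height player_x player_y
instance (width : Int) (height : Int) (player_x : Int) (player_y : Int) (out : List (List Bool)) : Decidable (Spec_initialize_discovered width height player_x player_y out) := by unfold Spec_initialize_discovered; infer_instance

-- ===== CLAIM (what is proved, stated in full; the proofs are below) =====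
def Claim_equal_initialize_discovered : Prop := ∀ (width : Int) (height : Int) (player_x : Int) (player_y : Int), Dom_initialize_discovered width height player_x player_y → Spec_initialize_discovered width height player_x player_y (initialize_discovered width height player_x player_y)

-- ===== LEMMAS AND PROOFS =====

def pvShape (width height : Int) (g : List (List Bool)) : Prop :=
  g.length = height.toNat ∧ ∀ r ∈ g, r.length = width.toNat

def pvCell (g : List (List Bool)) (j i : Nat) : Bool := ((g[j]?.getD [])[i]?.getD false)

lemma pvShape_upd (width height : Int) (g : List (List Bool)) (ny nx : Int)
    (hs : pvShape width height g) : pvShape width height (pvUpd width height g ny nx) := by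
  unfold pvUpd
  split_ifs with hc
  · obtain ⟨h1, h2⟩ := hs
    have hlt : ny.toNat < g.length := by omega
    refine ⟨by simpa using h1, ?_⟩
    intro r hr
    rcases List.mem_or_eq_of_mem_set hr with h3 | h3
    · exact h2 r h3
    · subst h3
      have : g[ny.toNat]? = some g[ny.toNat] := List.getElem?_eq_getElem hlt
      simp [this]
      exact h2 _ (List.getElem_mem hlt)
  · exact hs

lemma pvCell_upd (width height : Int) (g : List (List Bool)) (ny nx : Int) (j i : Nat)
    (hs : pvShape width height g) (hj : j < height.toNat) (hi : i < width.toNat) :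
    pvCell (pvUpd width height g ny nx) j i
      = (pvCell g j i || decide (ny = (j : Int) ∧ nx = (i : Int))) := by
  obtain ⟨h1, h2⟩ := hs
  unfold pvUpd
  split_ifs with hc
  · obtain ⟨ha, hb, hcc, hd⟩ := hc
    have hlt : ny.toNat < g.length := by omega
    by_cases hny : ny.toNat = j
    · have hnyi : ny = (j : Int) := by omega
      have hjlt : j < g.length := by omega
      have hrow : g[j]? = some g[j] := List.getElem?_eq_getElem hjlt
      have hrlen : g[j].length = width.toNat := h2 _ (List.getElem_mem hjlt)
      by_cases hnx : nx.toNat = i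
      · have hnxi : nx = (i : Int) := by omega
        have hilt : i < g[j].length := by omega
        simp [pvCell, hny, hrow, List.getElem?_set, hjlt, hnx, hilt, hnyi, hnxi]
      · have hnxi : ¬ (nx = (i : Int)) := by omega
        simp [pvCell, hny, hrow, List.getElem?_set, hjlt, hnx, hnxi]
    · have hnyi : ¬ (ny = (j : Int)) := by omega
      simp [pvCell, hny, hnyi]
  · have : ¬ (ny = (j : Int) ∧ nx = (i : Int)) := by
      rintro ⟨rfl, rfl⟩; exact hc (by omega)
    simp [this]

lemma pvCell_fold (width height : Int) (L : List (Int × Int)) (g : List (List Bool)) (j i : Nat)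
    (hs : pvShape width height g) (hj : j < height.toNat) (hi : i < width.toNat) :
    pvCell (L.foldl (fun g p => pvUpd width height g p.1 p.2) g) j i
      = (pvCell g j i || L.any (fun p => decide (p.1 = (j : Int) ∧ p.2 = (i : Int)))) := by
  induction L generalizing g with
  | nil => simp
  | cons p L ih =>
    simp only [List.foldl_cons, List.any_cons]
    rw [ih _ (pvShape_upd _ _ _ _ _ hs), pvCell_upd _ _ _ _ _ _ _ hs hj hi, Bool.or_assoc]

lemma pvShape_fold (width height : Int) (L : List (Int × Int)) (g : List (List Bool))
    (hs : pvShape width height g) :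
    pvShape width height (L.foldl (fun g p => pvUpd width height g p.1 p.2) g) := by
  induction L generalizing g with
  | nil => exact hs
  | cons p L ih => exact ih _ (pvShape_upd _ _ _ _ _ hs)

lemma pvA_eq_fold (width height player_x player_y : Int) :
    initialize_discovered width height player_x player_y
      = ([(player_y + -1, player_x + -1), (player_y + -1, player_x + 0), (player_y + -1, player_x + 1),
          (player_y + 0, player_x + -1), (player_y + 0, player_x + 0), (player_y + 0, player_x + 1),
          (player_y + 1, player_x + -1), (player_y + 1, player_x + 0), (player_y + 1, player_x + 1)].foldl
          (fun g p => pvUpd width height g p.1 p.2)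
          (List.replicate height.toNat (List.replicate width.toNat false))) := by
  have hr : PySem.List.pyRange (-1) 2 1 = [-1, 0, 1] := by decide
  simp [initialize_discovered, hr, List.foldl, List.map_const']

lemma pvShape_g0 (width height : Int) :
    pvShape width height (List.replicate height.toNat (List.replicate width.toNat false)) := by
  refine ⟨by simp, ?_⟩
  intro r hr
  rw [List.eq_of_mem_replicate hr]
  simp

lemma pvCell_A (width height player_x player_y : Int) (j i : Nat)
    (hj : j < height.toNat) (hi : i < width.toNat) :
    pvCell (initialize_discovered width height player_x player_y) j i
      = (decide (((i : Int) - player_x).natAbs ≤ 1) && decide (((j : Int) - player_y).natAbs ≤ 1)) := by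
  rw [pvA_eq_fold, pvCell_fold _ _ _ _ _ _ (pvShape_g0 _ _) hj hi]
  have hzero : pvCell (List.replicate height.toNat (List.replicate width.toNat false)) j i = false := by
    simp [pvCell, hj, hi]
  rw [hzero]
  rw [Bool.eq_iff_iff]
  simp only [Bool.false_or, List.any_cons, List.any_nil, Bool.or_eq_true, Bool.and_eq_true,
    Bool.or_false, decide_eq_true_eq]
  omega

theorem pv_main (width height player_x player_y : Int) :
    initialize_discovered width height player_x player_y
      = initialize_discovered_alt width height player_x player_y := by
  have hsA : pvShape width height (initialize_discovered width height player_x player_y) := by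
    rw [pvA_eq_fold]; exact pvShape_fold _ _ _ _ (pvShape_g0 _ _)
  obtain ⟨hlenA, hrowA⟩ := hsA
  apply List.ext_getElem
  · simp [initialize_discovered_alt, hlenA, PySem.List.length_pyRange_one]
  · intro j hj hj'
    have hjh : j < height.toNat := by simpa [hlenA] using hj
    have hBrow : (initialize_discovered_alt width height player_x player_y)[j]
        = (PySem.List.pyRange 0 width 1).map (fun x =>
            decide ((x - player_x).natAbs ≤ 1) && decide (((PySem.List.pyRange 0 height 1)[j]'(by
              simpa [PySem.List.length_pyRange_one] using hjh) - player_y).natAbs ≤ 1)) := by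
      simp [initialize_discovered_alt]
    rw [hBrow]
    have hrA : (initialize_discovered width height player_x player_y)[j].length = width.toNat :=
      hrowA _ (List.getElem_mem hj)
    apply List.ext_getElem
    · simp [hrA, PySem.List.length_pyRange_one]
    · intro i hi hi'
      have hiw : i < width.toNat := by simpa [hrA] using hi
      have hcA : (initialize_discovered width height player_x player_y)[j][i]
          = pvCell (initialize_discovered width height player_x player_y) j i := by
        simp [pvCell, hj, hi]
      rw [hcA, pvCell_A _ _ _ _ _ _ hjh hiw]
      simp [PySem.List.getElem_pyRange_one]

-- ===== VERDICT (by name: the statement is the Claim_ definition above) =====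
theorem initialize_discovered_spec : Claim_equal_initialize_discovered := by
  intro width height player_x player_y _
  exact pv_main width height player_x player_y
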